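-- pv_equiv track=rewrite | github.com/gperbone/topcoders-curso-python-dados | 0 - Projetos/Projeto-2/projeto2.py | limpa_combinacoes
-- ===== SOURCE A (Python) =====
-- def limpa_combinacoes(resultado: list) -> list:
--     '''
--     Função que exclui as permutações que apresentam um mesmo usuário mais de uma vez
--     PARAMETROS: lista com todas as permutações
--     RETORNO: lista com todas as permutações (ssem as permutações que apresentam um mesmo usuário mais de uma vez)
--     '''
--     lista_emails = []
--     for banda in resultado:
--         emails = []
--         for musico in banda:
--             emails.append(musico[1])
--         lista_emails.append(emails)
--
--     return [banda for index, banda in enumerate(resultado) if len(set(lista_emails[index])) == len(banda)]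
-- ===== SOURCE B (Python) =====
-- def limpa_combinacoes(resultado: list) -> list:
--     '''
--     Keeps the bands whose musicians' emails are pairwise distinct, detected by
--     sorting each band's emails and scanning adjacent pairs for an equal pair.
--     '''
--     def sem_repeticao(banda):
--         emails = sorted(musico[1] for musico in banda)
--         return all(a != b for a, b in zip(emails, emails[1:]))
--     return [banda for banda in resultado if sem_repeticao(banda)]
-- ===== Notes on version B (the rewrite author's own statement) =====
-- stated objective: alternative
-- what changed: Replaces A's two-pass scheme (precompute a parallel email table, then filter by comparing set cardinality with band length) with a single pass that sorts each band's emails and rejects a band exactly when the sorted list has an equal adjacent pair.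
import Mathlib
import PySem

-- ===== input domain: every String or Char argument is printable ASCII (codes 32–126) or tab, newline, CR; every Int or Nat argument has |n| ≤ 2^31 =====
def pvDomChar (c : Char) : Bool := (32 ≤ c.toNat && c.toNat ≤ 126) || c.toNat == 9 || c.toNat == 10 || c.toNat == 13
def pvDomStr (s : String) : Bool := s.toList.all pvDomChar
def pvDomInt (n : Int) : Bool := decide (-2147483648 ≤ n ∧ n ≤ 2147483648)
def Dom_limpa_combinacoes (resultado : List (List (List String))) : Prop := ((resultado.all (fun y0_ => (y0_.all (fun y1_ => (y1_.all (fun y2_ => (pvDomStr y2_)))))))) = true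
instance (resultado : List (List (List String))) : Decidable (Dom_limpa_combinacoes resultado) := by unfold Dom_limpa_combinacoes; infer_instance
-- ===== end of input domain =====

-- B replaces A's two-pass set-cardinality test (precomputed parallel email table + enumerate lookup)
-- with a single pass that sorts each band's emails and rejects on an equal adjacent pair (objective: alternative).

-- ===== PORT A =====
-- musico[1] raises IndexError when len(musico) < 2; Pre_ excludes that, so .getD "" is never reached inside Pre_.
def limpa_combinacoes (resultado : List (List (List String))) : List (List (List String)) :=
  let lista_emails : List (List String) :=
    resultado.foldl (fun acc banda =>
      acc ++ [banda.foldl (fun emails musico =>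
        emails ++ [(PySem.List.pyGet? musico 1).getD ""]) []]) []
  (PySem.List.enumerate resultado).filterMap (fun p =>
    if (PySem.Set.ofList ((PySem.List.pyGet? lista_emails p.1).getD [])).length = p.2.length
    then some p.2 else none)

-- ===== PORT B =====
def sem_repeticao (banda : List (List String)) : Bool :=
  let emails := PySem.List.sorted (banda.map (fun musico =>
    (PySem.List.pyGet? musico 1).getD "")) (fun x => x) false
  (emails.zip (PySem.List.slice emails (some 1) none)).all (fun p => p.1 != p.2)

def limpa_combinacoes_alt (resultado : List (List (List String))) : List (List (List String)) :=
  resultado.filter sem_repeticao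

-- ===== PRECONDITION & SPEC =====
-- Pre_ excludes exactly the inputs where some musico has fewer than 2 entries: there Python A
-- (and B alike) raises IndexError on musico[1].
def Pre_limpa_combinacoes (resultado : List (List (List String))) : Prop :=
  ∀ banda ∈ resultado, ∀ musico ∈ banda, 2 ≤ musico.length

instance (resultado : List (List (List String))) : Decidable (Pre_limpa_combinacoes resultado) := by
  unfold Pre_limpa_combinacoes; infer_instance

def pvWitness_limpa_combinacoes : List (List (List String)) :=
  [[["ana", "a@x"], ["bob", "b@x"]], [["ana", "a@x"], ["eve", "a@x"]]]

def Spec_limpa_combinacoes (resultado : List (List (List String))) (out : List (List (List String))) : Prop := out = limpa_combinacoes_alt resultado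
instance (resultado : List (List (List String))) (out : List (List (List String))) : Decidable (Spec_limpa_combinacoes resultado out) := by unfold Spec_limpa_combinacoes; infer_instance

-- ===== CLAIM (what is proved, stated in full; the proofs are below) =====
def Claim_equal_limpa_combinacoes : Prop := ∀ (resultado : List (List (List String))), Dom_limpa_combinacoes resultado → Pre_limpa_combinacoes resultado → Spec_limpa_combinacoes resultado (limpa_combinacoes resultado)

-- ===== LEMMAS AND PROOFS =====

-- filtering enumerate-with-lookup equals direct filter by a predicate agreeing with the table
theorem pv_enum_filter (f : List String → String)
    (L : List (List String)) (xs : List (List (List String))) (s : Int)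
    (h : ∀ (k : Nat) (hk : k < xs.length),
      (PySem.List.pyGet? L (s + (k : Int))).getD [] = xs[k].map f) :
    (PySem.List.enumerate xs s).filterMap (fun p =>
      if (PySem.Set.ofList ((PySem.List.pyGet? L p.1).getD [])).length = p.2.length
      then some p.2 else none)
    = xs.filter (fun b =>
        decide ((PySem.Set.ofList (b.map f)).length = b.length)) := by
  induction xs generalizing s with
  | nil => simp [PySem.List.enumerate_nil]
  | cons x xs ih =>
    have h0 : (PySem.List.pyGet? L s).getD [] = x.map f := by
      have := h 0 (by simp)
      simpa using this
    rw [PySem.List.enumerate_cons, List.filterMap_cons, List.filter_cons]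
    simp only [h0]
    rw [ih (s + 1) (fun k hk => by
      have := h (k + 1) (by simpa using Nat.succ_lt_succ hk)
      push_cast at this ⊢
      rw [show s + 1 + (k : Int) = s + ((k : Int) + 1) by ring]
      simpa using this)]
    by_cases hc : (PySem.Set.ofList (x.map f)).length = x.length <;> simp [hc]

-- on a ≤-sorted list, the adjacent-pairs-all-distinct scan detects exactly Nodup
theorem pv_adj_iff_nodup : ∀ (es : List String), es.Pairwise (· ≤ ·) →
    (((es.zip es.tail).all (fun p => p.1 != p.2) = true) ↔ es.Nodup) := by
  intro es
  induction es with
  | nil => simp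
  | cons a t ih =>
    intro hp
    cases t with
    | nil => simp
    | cons b t' =>
      have ha : ∀ x ∈ b :: t', a ≤ x := fun x hx => (List.pairwise_cons.mp hp).1 x hx
      have hpt : (b :: t').Pairwise (· ≤ ·) := (List.pairwise_cons.mp hp).2
      have hb : ∀ x ∈ t', b ≤ x := fun x hx => (List.pairwise_cons.mp hpt).1 x hx
      have hih := ih hpt
      simp only [List.tail_cons, List.zip_cons_cons, List.all_cons, Bool.and_eq_true,
        bne_iff_ne, ne_eq] at hih ⊢
      rw [hih]
      simp only [List.nodup_cons, List.mem_cons]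
      constructor
      · rintro ⟨hab, hnd⟩
        refine ⟨fun hmem => ?_, hnd⟩
        rcases hmem with h | h
        · exact hab h
        · exact hab (le_antisymm (ha b (by simp)) (hb a h) ▸ rfl)
      · rintro ⟨hnm, hnd⟩
        exact ⟨fun h => hnm (Or.inl h), hnd⟩

-- |set(ys)| = |ys| iff ys has no duplicates
theorem pv_set_len_iff_nodup (ys : List String) :
    (PySem.Set.ofList ys).length = ys.length ↔ ys.Nodup := by
  constructor
  · intro h
    have hnd := PySem.Set.nodup_ofList (xs := ys)
    have hsub : List.Subperm (PySem.Set.ofList ys) ys :=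
      hnd.subperm (fun x hx => (PySem.Set.mem_ofList ys x).mp hx)
    have hperm : (PySem.Set.ofList ys).Perm ys :=
      hsub.perm_of_length_le (le_of_eq h.symm)
    exact hperm.nodup_iff.mp hnd
  · intro h
    rw [PySem.Set.ofList_eq_self_of_nodup ys h]

-- A's set-cardinality test and B's sort-and-scan test agree on every band
theorem pv_pred_eq (b : List (List String)) :
    decide ((PySem.Set.ofList (b.map (fun musico =>
      (PySem.List.pyGet? musico 1).getD ""))).length = b.length) = sem_repeticao b := by
  rw [Bool.eq_iff_iff, decide_eq_true_iff]
  simp only [sem_repeticao, PySem.List.slice_from_one]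
  set ys := b.map (fun musico => (PySem.List.pyGet? musico 1).getD "") with hys
  have hlen : ys.length = b.length := by simp [hys]
  set es := PySem.List.sorted ys (fun x => x) false with hes
  have hperm : es.Perm ys := PySem.List.sorted_perm ys (fun x => x) false
  have hle : es.Pairwise (· ≤ ·) := by
    simpa using PySem.List.sorted_pairwise (xs := ys) (key := fun x => x)
  rw [← hlen, pv_set_len_iff_nodup, ← hperm.nodup_iff, ← pv_adj_iff_nodup es hle]

-- ===== VERDICT (by name: the statement is the Claim_ definition above) =====
theorem limpa_combinacoes_spec : Claim_equal_limpa_combinacoes := by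
  intro resultado _ _
  unfold Spec_limpa_combinacoes limpa_combinacoes limpa_combinacoes_alt
  rw [PySem.List.foldl_append_singleton_eq_map]
  simp only [List.nil_append]
  exact (pv_enum_filter (fun musico => (PySem.List.pyGet? musico 1).getD "")
      _ resultado 0 (fun k hk => by
    rw [show (0 : Int) + (k : Int) = (k : Int) by ring, PySem.List.pyGet?_natCast]
    simp [List.getElem?_eq_getElem hk, ← List.flatMap_def, ← List.map_eq_flatMap])).trans
    (List.filter_congr (fun b _ => pv_pred_eq b))
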